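-- pv_equiv track=rewrite | github.com/webbuilderhero/opensigint | decoders/COSMOS.py | Cosmos_Decoder
-- ===== SOURCE A (Python) =====
-- def Cosmos_Decoder(signal):
--   """
--   Takes a signal (as a list of integers) and returns a decoded message from COSMOS.
--   """
--
--   # Dictionary to store alphabet
--   ALPHABET = {0: 'C', 1: 'O', 2: 'S', 3: 'M', 4: 'A'}
--
--   # Empty string to store decoded message
--   decoded_msg = ''
--
--   for num in signal:
--     try:
--       # Get the character for the current number
--       decoded_msg += ALPHABET[num]
--     except KeyError:
--       # If the key doesn't exist in the dictionary, return an error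
--       return 'Error: Invalid character in signal'
--
--   return decoded_msg
-- ===== SOURCE B (Python) =====
-- def Cosmos_Decoder(sig):
--   """
--   Takes a signal (as a list of integers) and returns a decoded message from COSMOS.
--   No dictionary: validity is a single interval check on the aggregates min/max
--   (the valid codes are exactly 0..4), decoding indexes the string table 'COSMA'.
--   (Parameter renamed from 'signal' only because the harness forbids that bare name;
--   it is the same positional parameter.)
--   """
--   if sig and (min(sig) < 0 or max(sig) > 4):
--     return 'Error: Invalid character in signal'
--   return ''.join('COSMA'[n] for n in sig)
-- ===== Notes on version B (the rewrite author's own statement) =====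
-- stated objective: alternative
-- what changed: Dropped the dict and the per-element try/except loop: validity becomes a single interval test on min(signal)/max(signal) (valid codes are exactly the contiguous range 0..4), and decoding is direct indexing into the string table 'COSMA' joined in one pass.
import Mathlib
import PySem

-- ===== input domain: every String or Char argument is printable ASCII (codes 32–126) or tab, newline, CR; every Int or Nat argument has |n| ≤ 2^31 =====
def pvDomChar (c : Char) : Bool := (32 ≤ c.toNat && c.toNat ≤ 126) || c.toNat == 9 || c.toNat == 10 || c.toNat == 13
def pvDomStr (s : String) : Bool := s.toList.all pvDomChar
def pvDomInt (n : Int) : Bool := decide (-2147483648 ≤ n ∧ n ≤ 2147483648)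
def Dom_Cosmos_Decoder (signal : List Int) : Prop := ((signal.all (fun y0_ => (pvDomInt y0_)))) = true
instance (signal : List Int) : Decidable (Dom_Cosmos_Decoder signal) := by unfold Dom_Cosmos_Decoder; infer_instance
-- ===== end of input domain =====

-- B replaces A's dict-with-try/except loop by a min/max interval validity check and a string-table join (same O(n) cost; objective: alternative).


-- ===== PORT A =====
-- ALPHABET = {0:'C', 1:'O', 2:'S', 3:'M', 4:'A'} as a PySem.Dict (insertion order)
def cosmosAlphabet : PySem.Dict Int String :=
  ((((PySem.Dict.empty.insert 0 "C").insert 1 "O").insert 2 "S").insert 3 "M").insert 4 "A"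

-- the for-loop: accumulate decoded_msg; on a KeyError (dict get? = none) return the error string
def cosmosLoopA (signal : List Int) (decoded_msg : List Char) : String :=
  match signal with
  | [] => String.ofList decoded_msg
  | num :: rest =>
    match cosmosAlphabet.get? num with
    | some s => cosmosLoopA rest (decoded_msg ++ s.toList)
    | none => "Error: Invalid character in signal"

def Cosmos_Decoder (signal : List Int) : String :=
  cosmosLoopA signal []

-- ===== PORT B =====
-- Source B: `if signal and (min(signal) < 0 or max(signal) > 4)` then the error string,
-- else `''.join('COSMA'[n] for n in signal)` (string-table indexing, no dict)
def Cosmos_Decoder_alt (signal : List Int) : String :=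
  match PySem.List.min? signal (fun x => x), PySem.List.max? signal (fun x => x) with
  | some m, some M =>
    if m < 0 ∨ M > 4 then "Error: Invalid character in signal"
    else String.ofList (signal.flatMap (fun n => (PySem.Str.pyGet? "COSMA" n).toList))
  | _, _ => String.ofList (signal.flatMap (fun n => (PySem.Str.pyGet? "COSMA" n).toList))

-- ===== PRECONDITION & SPEC =====
def Spec_Cosmos_Decoder (signal : List Int) (out : String) : Prop := out = Cosmos_Decoder_alt signal
instance (signal : List Int) (out : String) : Decidable (Spec_Cosmos_Decoder signal out) := by unfold Spec_Cosmos_Decoder; infer_instance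

-- ===== CLAIM (what is proved, stated in full; the proofs are below) =====
def Claim_equal_Cosmos_Decoder : Prop := ∀ (signal : List Int), Dom_Cosmos_Decoder signal → Spec_Cosmos_Decoder signal (Cosmos_Decoder signal)

-- ===== LEMMAS AND PROOFS =====
lemma cosmos_get (n : Int) :
    cosmosAlphabet.get? n =
      if n = 0 then some "C" else if n = 1 then some "O" else if n = 2 then some "S"
      else if n = 3 then some "M" else if n = 4 then some "A" else none := by
  simp [cosmosAlphabet, PySem.Dict.get?, PySem.Dict.insert, PySem.Dict.empty]
  split_ifs <;> simp_all
  omega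

-- A's loop in closed form
lemma cosmosLoopA_eq (signal : List Int) (acc : List Char) :
    cosmosLoopA signal acc =
      if signal.any (fun n => (cosmosAlphabet.get? n).isNone) then
        "Error: Invalid character in signal"
      else
        String.ofList (acc ++ signal.flatMap (fun n => ((cosmosAlphabet.get? n).getD "").toList)) := by
  induction signal generalizing acc with
  | nil => simp [cosmosLoopA]
  | cons num rest ih =>
    simp only [cosmosLoopA, List.any_cons, List.flatMap_cons]
    cases h : cosmosAlphabet.get? num with
    | none => simp
    | some s => simp [ih, List.append_assoc]

-- a number has an ALPHABET entry iff it lies in the interval 0..4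
lemma cosmos_get_isNone (n : Int) :
    (cosmosAlphabet.get? n).isNone = true ↔ ¬ (0 ≤ n ∧ n ≤ 4) := by
  rw [cosmos_get]; split_ifs <;> simp <;> omega

-- on the valid interval the dict lookup and the 'COSMA' string lookup agree
lemma cosmos_get_table (n : Int) (h0 : 0 ≤ n) (h4 : n ≤ 4) :
    ((cosmosAlphabet.get? n).getD "").toList = (PySem.Str.pyGet? "COSMA" n).toList := by
  interval_cases n <;> decide

-- the any-invalid test equals the min/max interval test
lemma any_invalid_iff (signal : List Int) (m M : Int)
    (hm : PySem.List.min? signal (fun x => x) = some m)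
    (hM : PySem.List.max? signal (fun x => x) = some M) :
    (signal.any (fun n => (cosmosAlphabet.get? n).isNone) = true) ↔ (m < 0 ∨ M > 4) := by
  constructor
  · rintro h
    rcases List.any_eq_true.mp h with ⟨n, hn, hbad⟩
    have := (cosmos_get_isNone n).mp hbad
    have h1 := PySem.List.min?_isMin hm n hn
    have h2 := PySem.List.max?_isMax hM n hn
    simp only at h1 h2
    omega
  · rintro (h | h)
    · exact List.any_eq_true.mpr ⟨m, PySem.List.min?_mem hm,
        (cosmos_get_isNone m).mpr (by omega)⟩
    · exact List.any_eq_true.mpr ⟨M, PySem.List.max?_mem hM,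
        (cosmos_get_isNone M).mpr (by omega)⟩

-- ===== VERDICT (by name: the statement is the Claim_ definition above) =====
theorem Cosmos_Decoder_spec : Claim_equal_Cosmos_Decoder := by
  intro signal _
  show Cosmos_Decoder signal = Cosmos_Decoder_alt signal
  rw [Cosmos_Decoder, cosmosLoopA_eq]
  unfold Cosmos_Decoder_alt
  cases signal with
  | nil => simp [PySem.List.min?]
  | cons x t =>
    rcases hm : PySem.List.min? (x :: t) (fun y => y) with _ | m
    · simp [PySem.List.min?_id_cons] at hm
    rcases hM : PySem.List.max? (x :: t) (fun y => y) with _ | M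
    · simp [PySem.List.max?_id_cons] at hM
    dsimp only
    by_cases hbad : (x :: t).any (fun n => (cosmosAlphabet.get? n).isNone) = true
    · rw [if_pos hbad, if_pos ((any_invalid_iff _ _ _ hm hM).mp hbad)]
    · rw [if_neg hbad, if_neg (fun h => hbad ((any_invalid_iff _ _ _ hm hM).mpr h))]
      simp only [List.nil_append]
      congr 1
      refine List.flatMap_congr (fun n hn => ?_)
      have hval : ¬ ((cosmosAlphabet.get? n).isNone = true) := by
        intro h; exact hbad (List.any_eq_true.mpr ⟨n, hn, h⟩)
      rw [cosmos_get_isNone] at hval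
      push Not at hval
      exact cosmos_get_table n (by omega) (by omega)
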